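-- pv_equiv track=rewrite | github.com/working-backwards/wbr-app | src/wbr.py | get_bps_and_percentile_metrics
-- ===== SOURCE A (Python) =====
-- from itertools import groupby
--
-- def bps_or_percentile_collector(entry):
--     metric_config = entry[1]
--     return "metric_comparison_method" in metric_config and metric_config["metric_comparison_method"] == "bps"
--
-- def function_exists_collector(entry):
--     return "function" if "function" in entry[1] else "non_function"
--
-- def get_bps_and_percentile_metrics(metrics_configs):
--     # holds key as true or false and value as the list of (metric, metric config)
--     bps_and_percentile_metric_map = {k: list(v) for k, v in groupby(sorted(metrics_configs.items(),
--                                                                            key=bps_or_percentile_collector),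
--                                                                     key=bps_or_percentile_collector)}
--
--     # Further grouping by
--     bps_metric_map = {k: list(v) for k, v in groupby(sorted(bps_and_percentile_metric_map[True],
--                                                             key=function_exists_collector),
--                                                      key=function_exists_collector)} \
--         if True in bps_and_percentile_metric_map else {}
--
--     percentile_metric_map = {k: list(v) for k, v in groupby(sorted(bps_and_percentile_metric_map[False],
--                                                                    key=function_exists_collector),
--                                                             key=function_exists_collector)} \
--         if False in bps_and_percentile_metric_map else {}
--
--     # Extract lists of metrics
--     fn_bps_metrics = [entry[0] for entry in bps_metric_map["function"]] if "function" in bps_metric_map else []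
--     bps_metrics = [entry[0] for entry in bps_metric_map["non_function"]] if "non_function" in bps_metric_map else []
--     fn_percentile_metrics = [entry[0] for entry in percentile_metric_map["function"]] \
--         if "function" in percentile_metric_map else []
--     percentile_metrics = [entry[0] for entry in percentile_metric_map["non_function"]] \
--         if "non_function" in percentile_metric_map else []
--     return fn_bps_metrics, bps_metrics, fn_percentile_metrics, percentile_metrics
-- ===== SOURCE B (Python) =====
-- def get_bps_and_percentile_metrics(metrics_configs):
--     fn_bps_metrics, bps_metrics = [], []
--     fn_percentile_metrics, percentile_metrics = [], []
--     for metric, config in metrics_configs.items():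
--         is_bps = config.get("metric_comparison_method") == "bps"
--         has_fn = "function" in config
--         if is_bps:
--             (fn_bps_metrics if has_fn else bps_metrics).append(metric)
--         else:
--             (fn_percentile_metrics if has_fn else percentile_metrics).append(metric)
--     return fn_bps_metrics, bps_metrics, fn_percentile_metrics, percentile_metrics
-- ===== Notes on version B (the rewrite author's own statement) =====
-- stated objective: simpler
-- what changed: Replaces the two-level sorted/groupby/dict pipeline by a single left-to-right pass that classifies each metric into one of the four result lists; stable sorting by a two-valued key preserves insertion order within each group, so the outputs coincide.
import Mathlib
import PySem

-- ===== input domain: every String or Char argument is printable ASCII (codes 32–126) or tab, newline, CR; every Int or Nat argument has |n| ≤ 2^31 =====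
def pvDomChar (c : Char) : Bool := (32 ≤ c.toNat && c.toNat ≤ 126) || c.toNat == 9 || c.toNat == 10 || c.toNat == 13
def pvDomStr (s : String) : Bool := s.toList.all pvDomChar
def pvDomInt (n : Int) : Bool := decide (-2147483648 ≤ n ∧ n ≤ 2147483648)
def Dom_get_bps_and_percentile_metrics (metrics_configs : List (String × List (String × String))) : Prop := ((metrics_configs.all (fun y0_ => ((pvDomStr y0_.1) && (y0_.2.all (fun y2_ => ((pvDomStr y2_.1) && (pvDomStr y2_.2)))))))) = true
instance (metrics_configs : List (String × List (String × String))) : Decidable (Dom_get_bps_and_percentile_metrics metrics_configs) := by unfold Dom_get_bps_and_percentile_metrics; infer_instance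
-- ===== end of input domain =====

-- B replaces A's sort+groupby+dict pipeline by one left-to-right pass classifying into four lists (objective: simpler).


-- ===== PORT A =====
-- inner dicts are association lists (first match = Python's unique-key lookup; Pre_ keeps keys unique)
def pvLookup (d : List (String × String)) (k : String) : Option String :=
  (d.find? (fun p => p.1 == k)).map Prod.snd

def bps_or_percentile_collector (entry : String × List (String × String)) : Bool :=
  ((entry.2.map Prod.fst).contains "metric_comparison_method")
    && (pvLookup entry.2 "metric_comparison_method" == some "bps")

def function_exists_collector (entry : String × List (String × String)) : String :=
  if (entry.2.map Prod.fst).contains "function" then "function" else "non_function"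

-- itertools.groupby: runs of consecutive elements with equal key
def pvGroupBy {α κ : Type} [BEq κ] (key : α → κ) : List α → List (κ × List α)
  | [] => []
  | x :: xs =>
      (key x, x :: xs.takeWhile (fun y => key y == key x)) ::
        pvGroupBy key (xs.dropWhile (fun y => key y == key x))
termination_by l => l.length
decreasing_by
  exact Nat.lt_succ_of_le (List.length_dropWhile_le _ _)

-- {k: list(v) for k, v in groupby(sorted(xs, key), key)} — keys of consecutive runs are stored once
def pvGroupDict {α κ : Type} [BEq κ] [LT κ] [DecidableLT κ] (xs : List α) (key : α → κ) :
    List (κ × List α) :=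
  pvGroupBy key (PySem.List.sorted xs key false)

def pvDGet {κ ν : Type} [BEq κ] (d : List (κ × ν)) (k : κ) : Option ν :=
  (d.find? (fun p => p.1 == k)).map Prod.snd

def get_bps_and_percentile_metrics (metrics_configs : List (String × List (String × String))) : List String × List String × List String × List String :=
  let bps_and_percentile_metric_map := pvGroupDict metrics_configs bps_or_percentile_collector
  -- "… if True in map else {}" fused with the map[True] lookup
  let bps_metric_map := match pvDGet bps_and_percentile_metric_map true with
    | some v => pvGroupDict v function_exists_collector
    | none => []
  let percentile_metric_map := match pvDGet bps_and_percentile_metric_map false with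
    | some v => pvGroupDict v function_exists_collector
    | none => []
  let fn_bps_metrics := match pvDGet bps_metric_map "function" with
    | some l => l.map Prod.fst
    | none => []
  let bps_metrics := match pvDGet bps_metric_map "non_function" with
    | some l => l.map Prod.fst
    | none => []
  let fn_percentile_metrics := match pvDGet percentile_metric_map "function" with
    | some l => l.map Prod.fst
    | none => []
  let percentile_metrics := match pvDGet percentile_metric_map "non_function" with
    | some l => l.map Prod.fst
    | none => []
  (fn_bps_metrics, bps_metrics, fn_percentile_metrics, percentile_metrics)

-- ===== PORT B =====
def get_bps_and_percentile_metrics_alt (metrics_configs : List (String × List (String × String))) : List String × List String × List String × List String :=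
  metrics_configs.foldl
    (fun acc e =>
      let is_bps := pvLookup e.2 "metric_comparison_method" == some "bps"
      let has_fn := (e.2.map Prod.fst).contains "function"
      if is_bps then
        if has_fn then (acc.1 ++ [e.1], acc.2.1, acc.2.2.1, acc.2.2.2)
        else (acc.1, acc.2.1 ++ [e.1], acc.2.2.1, acc.2.2.2)
      else
        if has_fn then (acc.1, acc.2.1, acc.2.2.1 ++ [e.1], acc.2.2.2)
        else (acc.1, acc.2.1, acc.2.2.1, acc.2.2.2 ++ [e.1]))
    ([], [], [], [])

-- ===== PRECONDITION & SPEC =====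
-- Pre_ excludes association lists with duplicate outer or inner keys, which cannot arise from a
-- Python dict argument (dicts have unique keys); it excludes nothing a Python caller can pass.
def Pre_get_bps_and_percentile_metrics (metrics_configs : List (String × List (String × String))) : Prop :=
  (metrics_configs.map Prod.fst).Nodup ∧ ∀ e ∈ metrics_configs, (e.2.map Prod.fst).Nodup
instance (metrics_configs : List (String × List (String × String))) : Decidable (Pre_get_bps_and_percentile_metrics metrics_configs) := by unfold Pre_get_bps_and_percentile_metrics; infer_instance

def pvWitness_get_bps_and_percentile_metrics : (List (String × List (String × String))) :=
  [("m1", [("metric_comparison_method", "bps"), ("function", "sum")]),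
   ("m2", [("metric_comparison_method", "percentile")]),
   ("m3", [])]

def Spec_get_bps_and_percentile_metrics (metrics_configs : List (String × List (String × String))) (out : List String × List String × List String × List String) : Prop := out = get_bps_and_percentile_metrics_alt metrics_configs
instance (metrics_configs : List (String × List (String × String))) (out : List String × List String × List String × List String) : Decidable (Spec_get_bps_and_percentile_metrics metrics_configs out) := by unfold Spec_get_bps_and_percentile_metrics; infer_instance

-- ===== CLAIM (what is proved, stated in full; the proofs are below) =====
def Claim_equal_get_bps_and_percentile_metrics : Prop := ∀ (metrics_configs : List (String × List (String × String))), Dom_get_bps_and_percentile_metrics metrics_configs → Pre_get_bps_and_percentile_metrics metrics_configs → Spec_get_bps_and_percentile_metrics metrics_configs (get_bps_and_percentile_metrics metrics_configs)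

-- ===== LEMMAS AND PROOFS =====

-- B's two per-entry tests, named for the proofs
def pvIsB (e : String × List (String × String)) : Bool :=
  pvLookup e.2 "metric_comparison_method" == some "bps"

def pvHasFn (e : String × List (String × String)) : Bool :=
  (e.2.map Prod.fst).contains "function"

theorem pv_dget_nil {κ ν : Type} [BEq κ] (k : κ) : pvDGet ([] : List (κ × ν)) k = none := rfl

theorem pv_groupBy_nil {α κ : Type} [BEq κ] (key : α → κ) : pvGroupBy key [] = [] := by
  simp [pvGroupBy]

-- A's boolean collector equals B's single `.get(...) == "bps"` test
theorem pv_collector_eq (e : String × List (String × String)) :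
    bps_or_percentile_collector e = pvIsB e := by
  unfold bps_or_percentile_collector pvIsB
  cases h : e.2.find? (fun p => p.1 == "metric_comparison_method") with
  | none => simp [pvLookup, h]
  | some p =>
    have hp := List.find?_some h
    have hm := List.mem_of_find?_eq_some h
    have hc : (e.2.map Prod.fst).contains "metric_comparison_method" = true :=
      List.elem_eq_true_of_mem (List.mem_map.2 ⟨p, hm, eq_of_beq hp⟩)
    simp only [pvLookup, h, Option.map_some]
    rw [hc, Bool.true_and]

theorem pv_insertBy_append_of_not_before {α : Type} (before : α → α → Bool) (x : α)
    (fs ts : List α) (h : ∀ y ∈ fs, before x y = false) :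
    PySem.List.insertBy before x (fs ++ ts) = fs ++ PySem.List.insertBy before x ts := by
  induction fs with
  | nil => rfl
  | cons f fs ih =>
    have hf : before x f = false := h f (by simp)
    simp [PySem.List.insertBy, hf, ih (fun y hy => h y (by simp [hy]))]

theorem pv_insertBy_cons_all_before {α : Type} (before : α → α → Bool) (x : α)
    (ts : List α) (h : ∀ y ∈ ts, before x y = true) :
    PySem.List.insertBy before x ts = x :: ts := by
  cases ts with
  | nil => rfl
  | cons t ts => simp [PySem.List.insertBy, h t (by simp)]

-- a stable sort by a two-valued key is lows-then-highs, each part in original order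
theorem pv_sorted_two_valued {α κ : Type} [LinearOrder κ] (key : α → κ) (p : α → Bool)
    (lo hi : κ) (hlt : lo < hi) (hk : ∀ e, key e = if p e then lo else hi) (xs : List α) :
    PySem.List.sorted xs key false = xs.filter p ++ xs.filter (fun e => !p e) := by
  have aux : ∀ (xs fs ts : List α), (∀ y ∈ fs, p y = true) → (∀ y ∈ ts, p y = false) →
      xs.foldl (fun acc x => PySem.List.insertBy (fun a b => decide (key a < key b)) x acc)
        (fs ++ ts)
        = (fs ++ xs.filter p) ++ (ts ++ xs.filter (fun e => !p e)) := by
    intro xs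
    induction xs with
    | nil => intro fs ts _ _; simp
    | cons x xs ih =>
      intro fs ts hfs hts
      by_cases hp : p x = true
      · have hkx : key x = lo := by rw [hk x, hp]; simp
        have h1 : PySem.List.insertBy (fun a b => decide (key a < key b)) x (fs ++ ts)
            = (fs ++ [x]) ++ ts := by
          rw [pv_insertBy_append_of_not_before _ _ _ _
              (fun y hy => by simp [hk y, hfs y hy, hkx])]
          rw [pv_insertBy_cons_all_before _ _ _
              (fun y hy => by simp [hk y, hts y hy, hkx, hlt])]
          simp
        simp only [List.foldl_cons, h1]
        rw [ih (fs ++ [x]) ts (by intro y hy; rcases List.mem_append.1 hy with h | h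
                                  · exact hfs y h
                                  · simp at h; simpa [h] using hp) hts]
        simp [hp]
      · have hp' : p x = false := by simpa using hp
        have hkx : key x = hi := by rw [hk x, hp']; simp
        have h1 : PySem.List.insertBy (fun a b => decide (key a < key b)) x (fs ++ ts)
            = fs ++ (ts ++ [x]) := by
          rw [PySem.List.insertBy_of_forall_not_before]
          · simp
          · intro y hy
            rcases List.mem_append.1 hy with h | h
            · simp [hk y, hfs y h, hkx, not_lt_of_gt hlt]
            · simp [hk y, hts y h, hkx]
        simp only [List.foldl_cons, h1]
        rw [ih fs (ts ++ [x]) hfs (by intro y hy; rcases List.mem_append.1 hy with h | h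
                                      · exact hts y h
                                      · simp at h; simpa [h] using hp')]
        simp [hp']
  have := aux xs [] [] (by simp) (by simp)
  rw [PySem.List.sorted_eq_foldl_insertBy]
  simpa using this

theorem pv_takeWhile_append_all {α : Type} (pred : α → Bool) (u v : List α)
    (hu : ∀ y ∈ u, pred y = true) (hv : ∀ y ∈ v, pred y = false) :
    (u ++ v).takeWhile pred = u := by
  induction u with
  | nil =>
    cases v with
    | nil => rfl
    | cons b v => simp [List.takeWhile_cons, hv b (by simp)]
  | cons a u ih =>
    simp [List.takeWhile_cons, hu a (by simp), ih (fun y hy => hu y (by simp [hy]))]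

theorem pv_dropWhile_append_all {α : Type} (pred : α → Bool) (u v : List α)
    (hu : ∀ y ∈ u, pred y = true) (hv : ∀ y ∈ v, pred y = false) :
    (u ++ v).dropWhile pred = v := by
  induction u with
  | nil =>
    cases v with
    | nil => rfl
    | cons b v => simp [List.dropWhile_cons, hv b (by simp)]
  | cons a u ih =>
    simp [List.dropWhile_cons, hu a (by simp), ih (fun y hy => hu y (by simp [hy]))]

theorem pv_groupBy_const_prefix {α κ : Type} [BEq κ] [LawfulBEq κ] (key : α → κ)
    (a : α) (as bs : List α) (ka : κ) (ha : ∀ y ∈ a :: as, key y = ka)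
    (hb : ∀ y ∈ bs, key y ≠ ka) :
    pvGroupBy key ((a :: as) ++ bs) = (ka, a :: as) :: pvGroupBy key bs := by
  have hka : key a = ka := ha a (by simp)
  have htw : (as ++ bs).takeWhile (fun y => key y == key a) = as :=
    pv_takeWhile_append_all _ _ _
      (fun y hy => by simp [ha y (by simp [hy]), hka])
      (fun y hy => by simp [hka]; exact hb y hy)
  have hdw : (as ++ bs).dropWhile (fun y => key y == key a) = bs :=
    pv_dropWhile_append_all _ _ _
      (fun y hy => by simp [ha y (by simp [hy]), hka])
      (fun y hy => by simp [hka]; exact hb y hy)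
  simp only [List.cons_append, pvGroupBy]
  rw [htw, hdw, hka]

-- the two dict lookups done on the groupby of a lows-then-highs list
theorem pv_dget_two_groups {α κ : Type} [BEq κ] [LawfulBEq κ] (key : α → κ)
    (as bs : List α) (ka kb : κ) (hab : ka ≠ kb)
    (ha : ∀ y ∈ as, key y = ka) (hb : ∀ y ∈ bs, key y = kb) :
    pvDGet (pvGroupBy key (as ++ bs)) ka = (if as = [] then none else some as)
    ∧ pvDGet (pvGroupBy key (as ++ bs)) kb = (if bs = [] then none else some bs) := by
  have hg : pvGroupBy key (as ++ bs)
      = (if as = [] then [] else [(ka, as)]) ++ (if bs = [] then [] else [(kb, bs)]) := by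
    cases as with
    | nil =>
      cases bs with
      | nil => simp [pv_groupBy_nil]
      | cons b bs =>
        have h2 := pv_groupBy_const_prefix key b bs [] kb hb (by simp)
        simp [pv_groupBy_nil] at h2
        simpa using h2
    | cons a as =>
      have h1 := pv_groupBy_const_prefix key a as bs ka ha
        (fun y hy => by rw [hb y hy]; exact fun h => hab h.symm)
      cases bs with
      | nil => simpa [pv_groupBy_nil] using h1
      | cons b bs' =>
        rw [h1]
        have h2 := pv_groupBy_const_prefix key b bs' [] kb hb (by simp)
        simp [pv_groupBy_nil] at h2
        simp [h2]
  rw [hg]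
  constructor
  · by_cases has : as = [] <;> by_cases hbs : bs = [] <;>
      simp [has, hbs, pvDGet, hab, Ne.symm hab, beq_iff_eq]
  · by_cases has : as = [] <;> by_cases hbs : bs = [] <;>
      simp [has, hbs, pvDGet, hab, Ne.symm hab, beq_iff_eq]

-- the second level: sort+groupby by "function"/"non_function", then the two lookups
theorem pv_level2_key (y : String × List (String × String)) :
    function_exists_collector y = if pvHasFn y then "function" else "non_function" := rfl

theorem pv_level2 (v : List (String × List (String × String))) :
    pvDGet (pvGroupBy function_exists_collector
        (PySem.List.sorted v function_exists_collector false)) "function"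
      = (if v.filter pvHasFn = [] then none else some (v.filter pvHasFn))
    ∧ pvDGet (pvGroupBy function_exists_collector
        (PySem.List.sorted v function_exists_collector false)) "non_function"
      = (if v.filter (fun e => !pvHasFn e) = [] then none
         else some (v.filter (fun e => !pvHasFn e))) := by
  have hlt : ("function" : String) < "non_function" := by
    rw [String.lt_iff_toList_lt]; decide
  have hsort : PySem.List.sorted v function_exists_collector false
      = v.filter pvHasFn ++ v.filter (fun e => !pvHasFn e) :=
    pv_sorted_two_valued _ pvHasFn "function" "non_function" hlt (fun e => pv_level2_key e) v
  have h := pv_dget_two_groups function_exists_collector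
    (v.filter pvHasFn) (v.filter (fun e => !pvHasFn e))
    "function" "non_function" (by simp [hlt.ne])
    (fun y hy => by
      have h0 := List.of_mem_filter hy
      rw [pv_level2_key y, h0]; rfl)
    (fun y hy => by
      have h0 := List.of_mem_filter hy
      simp only [Bool.not_eq_eq_eq_not, Bool.not_true] at h0
      rw [pv_level2_key y, h0]; rfl)
  rw [hsort]
  exact h

-- combining two successive filters / a filter that must be empty
theorem pv_filter_filter {α : Type} (l : List α) (p q : α → Bool) :
    (l.filter p).filter q = l.filter (fun e => p e && q e) := by
  rw [List.filter_filter]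
  exact List.filter_congr (fun e _ => Bool.and_comm _ _)

theorem pv_filter_and_nil {α : Type} (l : List α) (p q : α → Bool)
    (h : l.filter p = []) : l.filter (fun e => p e && q e) = [] := by
  rw [List.filter_eq_nil_iff] at *
  intro a ha
  simp [h a ha]

-- B's fold, with the four accumulators generalized
theorem pv_alt_eq_filters (metrics_configs : List (String × List (String × String))) :
    get_bps_and_percentile_metrics_alt metrics_configs
      = ((metrics_configs.filter (fun e => pvIsB e && pvHasFn e)).map Prod.fst,
         (metrics_configs.filter (fun e => pvIsB e && !pvHasFn e)).map Prod.fst,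
         (metrics_configs.filter (fun e => !pvIsB e && pvHasFn e)).map Prod.fst,
         (metrics_configs.filter (fun e => !pvIsB e && !pvHasFn e)).map Prod.fst) := by
  have hstep : (fun (acc : List String × List String × List String × List String)
      (e : String × List (String × String)) =>
        let is_bps := pvLookup e.2 "metric_comparison_method" == some "bps"
        let has_fn := (e.2.map Prod.fst).contains "function"
        if is_bps then
          if has_fn then (acc.1 ++ [e.1], acc.2.1, acc.2.2.1, acc.2.2.2)
          else (acc.1, acc.2.1 ++ [e.1], acc.2.2.1, acc.2.2.2)
        else
          if has_fn then (acc.1, acc.2.1, acc.2.2.1 ++ [e.1], acc.2.2.2)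
          else (acc.1, acc.2.1, acc.2.2.1, acc.2.2.2 ++ [e.1]))
      = (fun acc e =>
          if pvIsB e then
            if pvHasFn e then (acc.1 ++ [e.1], acc.2.1, acc.2.2.1, acc.2.2.2)
            else (acc.1, acc.2.1 ++ [e.1], acc.2.2.1, acc.2.2.2)
          else
            if pvHasFn e then (acc.1, acc.2.1, acc.2.2.1 ++ [e.1], acc.2.2.2)
            else (acc.1, acc.2.1, acc.2.2.1, acc.2.2.2 ++ [e.1])) := rfl
  have aux : ∀ (l : List (String × List (String × String)))
      (acc : List String × List String × List String × List String),
      l.foldl (fun acc e =>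
          if pvIsB e then
            if pvHasFn e then (acc.1 ++ [e.1], acc.2.1, acc.2.2.1, acc.2.2.2)
            else (acc.1, acc.2.1 ++ [e.1], acc.2.2.1, acc.2.2.2)
          else
            if pvHasFn e then (acc.1, acc.2.1, acc.2.2.1 ++ [e.1], acc.2.2.2)
            else (acc.1, acc.2.1, acc.2.2.1, acc.2.2.2 ++ [e.1])) acc
      = (acc.1 ++ (l.filter (fun e => pvIsB e && pvHasFn e)).map Prod.fst,
         acc.2.1 ++ (l.filter (fun e => pvIsB e && !pvHasFn e)).map Prod.fst,
         acc.2.2.1 ++ (l.filter (fun e => !pvIsB e && pvHasFn e)).map Prod.fst,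
         acc.2.2.2 ++ (l.filter (fun e => !pvIsB e && !pvHasFn e)).map Prod.fst) := by
    intro l
    induction l with
    | nil => intro acc; simp
    | cons e l ih =>
      intro acc
      simp only [List.foldl_cons, List.filter_cons]
      by_cases hb : pvIsB e = true <;> by_cases hf : pvHasFn e = true <;>
        simp [hb, hf, ih] <;> simp_all
  unfold get_bps_and_percentile_metrics_alt
  rw [hstep]
  simpa using aux metrics_configs ([], [], [], [])

-- ===== VERDICT (by name: the statement is the Claim_ definition above) =====
theorem get_bps_and_percentile_metrics_spec : Claim_equal_get_bps_and_percentile_metrics := by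
  intro mc _ _
  unfold Spec_get_bps_and_percentile_metrics
  unfold get_bps_and_percentile_metrics pvGroupDict
  have hcol : bps_or_percentile_collector = pvIsB := funext pv_collector_eq
  rw [hcol]
  -- level 1: the stable sort by the boolean collector splits into non-bps then bps, in order
  have hsort : PySem.List.sorted mc pvIsB false
      = mc.filter (fun e => !pvIsB e) ++ mc.filter pvIsB := by
    have := pv_sorted_two_valued pvIsB (fun e => !pvIsB e) false true (by decide)
      (fun e => by cases h : pvIsB e <;> simp [h]) mc
    rw [this]
    exact congrArg _ (List.filter_congr (fun e _ => by simp))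
  have hgrp := pv_dget_two_groups pvIsB
    (mc.filter (fun e => !pvIsB e)) (mc.filter pvIsB) false true (by decide)
    (fun y hy => by have := List.of_mem_filter hy; simpa using this)
    (fun y hy => List.of_mem_filter hy)
  rw [hsort]
  dsimp only
  rw [hgrp.1, hgrp.2, pv_alt_eq_filters]
  by_cases hB : mc.filter pvIsB = []
  · by_cases hP : mc.filter (fun e => !pvIsB e) = []
    · simp [hB, hP, pv_dget_nil, pv_groupBy_nil,
            pv_filter_and_nil _ _ _ hB, pv_filter_and_nil _ _ _ hP]
    · simp only [hB, hP, reduceIte, pv_groupBy_nil, pv_dget_nil,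
                 (pv_level2 _).1, (pv_level2 _).2, pv_filter_filter, apply_ite]
      simp [pv_filter_and_nil _ _ _ hB, pv_filter_filter]
      constructor <;> (split <;> simp_all)
  · by_cases hP : mc.filter (fun e => !pvIsB e) = []
    · simp only [hB, hP, reduceIte, pv_groupBy_nil, pv_dget_nil,
                 (pv_level2 _).1, (pv_level2 _).2, pv_filter_filter, apply_ite]
      simp [pv_filter_and_nil _ _ _ hP, pv_filter_filter]
      constructor <;> (split <;> simp_all)
    · simp only [hB, hP, reduceIte,
                 (pv_level2 _).1, (pv_level2 _).2, pv_filter_filter, apply_ite]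
      simp [pv_filter_filter]
      refine ⟨?_, ?_, ?_, ?_⟩ <;> (split <;> simp_all)
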